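-- pv_equiv track=rewrite | github.com/junbojohn/edurange-flask-mybranch | utils.py | guideHelp3
-- ===== SOURCE A (Python) =====
-- def guideHelp3(ls):
--     # reads a list of html and separates it into a list of a head string and a content string
--     h1 = '<h1>'
--     h2 = '<h2>'
--     h3 = '<h3>'
--     col3 = 'class="colH3"'
--     colSec = []
--     section_head = ''
--     hd = False
--     c3 = False
--     content = ''
--     for line in ls:
--         if not hd:
--             if col3 in line:
--                 line = line.replace('<h2 class="colH3">', '').replace('</h2>', '')
--                 colSec.append(line)
--                 c3 = True
--                 hd = True
--             if (h1 in line) or (h2 in line):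
--                 section_head = line
--                 hd = True
--         elif c3:
--             if h3 in line:
--                 colSec.append(content)
--                 colSec.append(line)
--                 content = ''
--             else:
--                 content = content + line
--         else:
--             content = content + line
--     if c3:
--         colSec.append(content)
--         return colSec
--     # section_head = section_head.replace('<h1>', '').replace('</h1>', '')
--     section_head = section_head.replace('<h2>', '').replace('</h2>', '')
--     return [section_head, content]
-- ===== SOURCE B (Python) =====
-- def guideHelp3(ls):
--     # Skip to the first header line, then split the remainder at '<h3>' delimiter
--     # lines and join each whole segment at once (no running-string state machine).
--     col3 = 'class="colH3"'
--
--     def is_header(line):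
--         return col3 in line or '<h1>' in line or '<h2>' in line
--
--     k = 0
--     while k < len(ls) and not is_header(ls[k]):
--         k += 1
--     if k == len(ls):
--         return ['', '']
--     head = ls[k]
--     if col3 not in head:
--         return [head.replace('<h2>', '').replace('</h2>', ''), ''.join(ls[k + 1:])]
--     out = [head.replace('<h2 class="colH3">', '').replace('</h2>', '')]
--     start = k + 1
--     while True:
--         j = start
--         while j < len(ls) and '<h3>' not in ls[j]:
--             j += 1
--         out.append(''.join(ls[start:j]))
--         if j == len(ls):
--             return out
--         out.append(ls[j])
--         start = j + 1
-- ===== Notes on version B (the rewrite author's own statement) =====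
-- stated objective: alternative
-- what changed: B replaces A's single-pass five-flag state machine with a running content string by an index scan to the first header followed by splitting the remainder at '<h3>' delimiter lines and joining each whole segment at once with ''.join.
import Mathlib
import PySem

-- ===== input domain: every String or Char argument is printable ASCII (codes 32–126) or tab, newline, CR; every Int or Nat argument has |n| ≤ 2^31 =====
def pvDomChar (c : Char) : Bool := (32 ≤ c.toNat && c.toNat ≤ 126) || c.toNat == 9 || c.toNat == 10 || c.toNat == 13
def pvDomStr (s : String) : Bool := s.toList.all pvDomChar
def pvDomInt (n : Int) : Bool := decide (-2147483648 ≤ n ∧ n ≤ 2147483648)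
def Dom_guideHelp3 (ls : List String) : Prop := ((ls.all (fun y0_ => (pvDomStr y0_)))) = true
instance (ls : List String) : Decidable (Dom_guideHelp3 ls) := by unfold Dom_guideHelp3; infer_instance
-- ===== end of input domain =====

-- B replaces A's one-pass five-flag state machine by skip-to-header followed by
-- split-at-'<h3>'-delimiters with whole-segment joins; objective: alternative decomposition.

-- ===== PORT A =====
-- state: (colSec, section_head, hd, c3, content)
def guideHelp3Step (st : List String × String × Bool × Bool × String) (line0 : String) :
    List String × String × Bool × Bool × String :=
  let (colSec, sh, hd, c3, content) := st
  if hd = false then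
    -- 'if col3 in line': may rebind line, colSec, c3, hd
    let t :=
      if PySem.Str.isIn "class=\"colH3\"" line0 then
        let l := PySem.Str.replace (PySem.Str.replace line0 "<h2 class=\"colH3\">" "") "</h2>" ""
        (l, colSec ++ [l], true, true)
      else (line0, colSec, c3, hd)
    let (line, colSec', c3', hd') := t
    -- 'if (h1 in line) or (h2 in line)'
    if PySem.Str.isIn "<h1>" line || PySem.Str.isIn "<h2>" line then
      (colSec', line, true, c3', content)
    else (colSec', sh, hd', c3', content)
  else if c3 = true then
    if PySem.Str.isIn "<h3>" line0 then
      (colSec ++ [content, line0], sh, hd, c3, "")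
    else (colSec, sh, hd, c3, content ++ line0)
  else (colSec, sh, hd, c3, content ++ line0)

def guideHelp3 (ls : List String) : List String :=
  let st := ls.foldl guideHelp3Step ([], "", false, false, "")
  let (colSec, sh, _, c3, content) := st
  if c3 = true then colSec ++ [content]
  else [PySem.Str.replace (PySem.Str.replace sh "<h2>" "") "</h2>" "", content]

-- ===== PORT B =====
def altIsHeader (l : String) : Bool :=
  PySem.Str.isIn "class=\"colH3\"" l || (PySem.Str.isIn "<h1>" l || PySem.Str.isIn "<h2>" l)

-- the outer 'advance k until is_header' while-loop: suffix starting at the first header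
def altSkip : List String → List String
  | [] => []
  | l :: rest => if altIsHeader l then l :: rest else altSkip rest

-- the inner 'advance j while no <h3>' while-loop: segment before the first '<h3>' line, and the rest
def altSpan : List String → List String × List String
  | [] => ([], [])
  | l :: rest =>
    if PySem.Str.isIn "<h3>" l then ([], l :: rest)
    else let (a, b) := altSpan rest; (l :: a, b)

theorem altSpan_snd_len (xs : List String) : (altSpan xs).2.length ≤ xs.length := by
  induction xs with
  | nil => simp [altSpan]
  | cons l rest ih =>
    simp only [altSpan]
    split
    · simp
    · simpa using Nat.le_succ_of_le ih

-- the outer 'while True' loop: join the segment, emit the delimiter line, continue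
def altSections (tail : List String) : List String :=
  match h : altSpan tail with
  | (seg, []) => [PySem.Str.join "" seg]
  | (seg, d :: rest') => PySem.Str.join "" seg :: d :: altSections rest'
  termination_by tail.length
  decreasing_by
    have := altSpan_snd_len tail
    rw [h] at this
    simp at this
    omega

def guideHelp3_alt (ls : List String) : List String :=
  match altSkip ls with
  | [] => ["", ""]
  | head :: tail =>
    if PySem.Str.isIn "class=\"colH3\"" head then
      PySem.Str.replace (PySem.Str.replace head "<h2 class=\"colH3\">" "") "</h2>" "" :: altSections tail
    else
      [PySem.Str.replace (PySem.Str.replace head "<h2>" "") "</h2>" "", PySem.Str.join "" tail]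

-- ===== PRECONDITION & SPEC =====
def Spec_guideHelp3 (ls : List String) (out : List String) : Prop := out = guideHelp3_alt ls
instance (ls : List String) (out : List String) : Decidable (Spec_guideHelp3 ls out) := by unfold Spec_guideHelp3; infer_instance

-- ===== CLAIM (what is proved, stated in full; the proofs are below) =====
def Claim_equal_guideHelp3 : Prop := ∀ (ls : List String), Dom_guideHelp3 ls → Spec_guideHelp3 ls (guideHelp3 ls)

-- ===== LEMMAS AND PROOFS =====

theorem join_empty_cons (x : String) (xs : List String) :
    PySem.Str.join "" (x :: xs) = x ++ PySem.Str.join "" xs := by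
  apply String.toList_inj.mp
  rcases xs with _ | ⟨y, ys⟩
  · simp only [PySem.Str.join, String.toList_empty, List.map_cons, List.map_nil,
      PySem.Chars.join_singleton, String.ofList_toList, PySem.Chars.join_nil,
      String.ofList_nil, String.append_empty]
  · simp only [PySem.Str.join, List.map_cons, String.toList_empty]
    rw [PySem.Chars.join_cons_cons]
    simp

theorem join_empty_nil : PySem.Str.join "" ([] : List String) = "" := by
  apply String.toList_inj.mp
  simp [PySem.Str.join, PySem.Chars.join_nil]

-- prepend a string to the first section of a nonempty section list
def consHead (c : String) : List String → List String
  | [] => [c]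
  | x :: xs => (c ++ x) :: xs

theorem altSections_unfold (t : List String) (seg : List String) (r : List String)
    (h : altSpan t = (seg, r)) :
    altSections t = (match r with
      | [] => [PySem.Str.join "" seg]
      | d :: r' => PySem.Str.join "" seg :: d :: altSections r') := by
  rw [altSections]
  split
  · next s2 heq =>
      have h2 := h.symm.trans heq
      injection h2 with e1 e2
      subst e1; subst e2; rfl
  · next s2 d2 r2 heq =>
      have h2 := h.symm.trans heq
      injection h2 with e1 e2
      subst e1; subst e2; rfl

theorem altSections_shape (t : List String) : ∃ x xs, altSections t = x :: xs := by
  rcases h : altSpan t with ⟨seg, r⟩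
  rw [altSections_unfold t seg r h]
  cases r <;> exact ⟨_, _, rfl⟩

theorem consHead_empty (t : List String) : consHead "" (altSections t) = altSections t := by
  obtain ⟨x, xs, h⟩ := altSections_shape t
  simp [h, consHead]

theorem consHead_consHead (c l : String) (xs : List String) :
    consHead (c ++ l) xs = consHead c (consHead l xs) := by
  cases xs <;> simp [consHead, String.append_assoc]

theorem altSections_cons_noh3 (l : String) (rest : List String)
    (hl : PySem.Str.isIn "<h3>" l = false) :
    altSections (l :: rest) = consHead l (altSections rest) := by
  rcases hsp : altSpan rest with ⟨a, b⟩
  have hs : altSpan (l :: rest) = (l :: a, b) := by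
    simp only [altSpan]; rw [hl]; simp [hsp]
  rw [altSections_unfold (l :: rest) _ _ hs, altSections_unfold rest a b hsp]
  cases b <;> simp [consHead, join_empty_cons]

theorem altSections_cons_h3 (l : String) (rest : List String)
    (hl : PySem.Str.isIn "<h3>" l = true) :
    altSections (l :: rest) = "" :: l :: altSections rest := by
  have hs : altSpan (l :: rest) = ([], l :: rest) := by
    simp only [altSpan]; rw [hl]; simp
  rw [altSections_unfold (l :: rest) _ _ hs, join_empty_nil]

-- A's c3-mode loop keeps flags and section_head fixed; its list/content state is c3Step
def c3Step (st : List String × String) (line : String) : List String × String :=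
  if PySem.Str.isIn "<h3>" line then (st.1 ++ [st.2, line], "") else (st.1, st.2 ++ line)

theorem loopC3 (rest : List String) (colSec : List String) (sh : String) (content : String) :
    rest.foldl guideHelp3Step (colSec, sh, true, true, content) =
      ((rest.foldl c3Step (colSec, content)).1, sh, true, true,
       (rest.foldl c3Step (colSec, content)).2) := by
  induction rest generalizing colSec content with
  | nil => rfl
  | cons l rest ih =>
    simp only [List.foldl_cons]
    rw [show guideHelp3Step (colSec, sh, true, true, content) l =
        ((c3Step (colSec, content) l).1, sh, true, true, (c3Step (colSec, content) l).2) from ?_, ih]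
    simp only [guideHelp3Step, c3Step]
    norm_num
    split <;> rfl

-- the finished c3 state equals the split-at-delimiters section list of B
theorem c3fold_sections (rest : List String) (colSec : List String) (content : String) :
    (rest.foldl c3Step (colSec, content)).1 ++ [(rest.foldl c3Step (colSec, content)).2] =
      colSec ++ consHead content (altSections rest) := by
  induction rest generalizing colSec content with
  | nil =>
    rw [altSections]
    simp [altSpan, consHead, join_empty_nil, List.foldl_nil]
  | cons l rest ih =>
    simp only [List.foldl_cons]
    by_cases hl : PySem.Str.isIn "<h3>" l = true
    · have hstep : c3Step (colSec, content) l = (colSec ++ [content, l], "") := by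
        simp only [c3Step]; rw [hl]; simp
      rw [hstep, ih, altSections_cons_h3 l rest hl, consHead_empty]
      simp [consHead]
    · have hl' : PySem.Str.isIn "<h3>" l = false := by
        cases h : PySem.Str.isIn "<h3>" l
        · rfl
        · exact absurd h hl
      have hstep : c3Step (colSec, content) l = (colSec, content ++ l) := by
        simp only [c3Step]; rw [hl']; simp
      rw [hstep, ih, altSections_cons_noh3 l rest hl', consHead_consHead]

-- A's plain-header loop: concatenation
theorem loopPlain (rest : List String) (colSec : List String) (sh : String) (content : String) :
    rest.foldl guideHelp3Step (colSec, sh, true, false, content) =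
      (colSec, sh, true, false, content ++ PySem.Str.join "" rest) := by
  induction rest generalizing content with
  | nil => simp [join_empty_nil]
  | cons l rest ih =>
    simp only [List.foldl_cons]
    rw [show guideHelp3Step (colSec, sh, true, false, content) l =
        (colSec, sh, true, false, content ++ l) from by
          simp only [guideHelp3Step]; norm_num, ih, join_empty_cons]
    simp [String.append_assoc]

-- ===== VERDICT (by name: the statement is the Claim_ definition above) =====
theorem guideHelp3_spec : Claim_equal_guideHelp3 := by
  intro ls hdom
  unfold Spec_guideHelp3
  clear hdom
  induction ls with
  | nil => decide
  | cons line rest ih =>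
    by_cases hc : PySem.Str.isIn "class=\"colH3\"" line = true
    · -- colH3 header line
      obtain ⟨sh2, hstep⟩ : ∃ sh2, guideHelp3Step ([], "", false, false, "") line =
          ([PySem.Str.replace (PySem.Str.replace line "<h2 class=\"colH3\">" "") "</h2>" ""],
           sh2, true, true, "") := by
        by_cases hh2 : (PySem.Str.isIn "<h1>" (PySem.Str.replace (PySem.Str.replace line "<h2 class=\"colH3\">" "") "</h2>" "") || PySem.Str.isIn "<h2>" (PySem.Str.replace (PySem.Str.replace line "<h2 class=\"colH3\">" "") "</h2>" "")) = true
        · exact ⟨PySem.Str.replace (PySem.Str.replace line "<h2 class=\"colH3\">" "") "</h2>" "",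
            by simp only [guideHelp3Step, reduceCtorEq, if_pos hc, if_pos hh2, reduceIte,
              List.nil_append]⟩
        · exact ⟨"", by simp only [guideHelp3Step, reduceCtorEq, if_pos hc, if_neg hh2, reduceIte,
            List.nil_append]⟩
      have hskip : altSkip (line :: rest) = line :: rest := by
        have hhdr : altIsHeader line = true := by
          unfold altIsHeader; rw [hc]; rfl
        simp only [altSkip]; rw [hhdr]; simp
      simp only [guideHelp3, guideHelp3_alt, List.foldl_cons, hstep, loopC3, hskip, if_pos hc,
        reduceIte]
      rw [c3fold_sections, consHead_empty]
      simp
    · by_cases hh : (PySem.Str.isIn "<h1>" line || PySem.Str.isIn "<h2>" line) = true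
      · -- plain h1/h2 header line
        have hstep : guideHelp3Step ([], "", false, false, "") line =
            ([], line, true, false, "") := by
          simp only [guideHelp3Step, reduceCtorEq, if_neg hc, if_pos hh, reduceIte]
        have hskip : altSkip (line :: rest) = line :: rest := by
          have hhdr : altIsHeader line = true := by
            unfold altIsHeader; rw [hh]; simp
          simp only [altSkip]; rw [hhdr]; simp
        simp only [guideHelp3, guideHelp3_alt, List.foldl_cons, hstep, loopPlain, hskip,
          if_neg hc]
        simp
      · -- no header yet: line is dropped by both
        have hstep : guideHelp3Step ([], "", false, false, "") line =
            ([], "", false, false, "") := by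
          simp only [guideHelp3Step, reduceCtorEq, if_neg hc, if_neg hh, reduceIte]
        have hskip : altSkip (line :: rest) = altSkip rest := by
          have hc' : PySem.Str.isIn "class=\"colH3\"" line = false := by
            cases h : PySem.Str.isIn "class=\"colH3\"" line
            · rfl
            · exact absurd h hc
          have hh' : (PySem.Str.isIn "<h1>" line || PySem.Str.isIn "<h2>" line) = false := by
            cases h : PySem.Str.isIn "<h1>" line || PySem.Str.isIn "<h2>" line
            · rfl
            · exact absurd h hh
          have hhdr : altIsHeader line = false := by
            unfold altIsHeader; rw [hc', hh']; rfl
          simp only [altSkip]; rw [hhdr]; simp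
        have hA : guideHelp3 (line :: rest) = guideHelp3 rest := by
          simp only [guideHelp3, List.foldl_cons, hstep]
        have hB : guideHelp3_alt (line :: rest) = guideHelp3_alt rest := by
          simp only [guideHelp3_alt, hskip]
        rw [hA, hB]
        exact ih
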